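-- pv_equiv track=rewrite | github.com/sergiovasquez122/Programming-for-the-puzzled-solutions | chapter_2/exercise_3.py | chooseTime
-- ===== SOURCE A (Python) =====
-- def chooseTime(times):
--     rcount = 0
--     maxcount = 0
--     time = 0
--     score = 0
--     max_score = 0
--     # Range through the times computing a running count of celebrities
--     for t in times:
--         if t[1] == 'start':
--             rcount = rcount + 1
--             score += t[2]
--         elif t[1] == 'end':
--             rcount = rcount - 1
--             score -= t[2]
--         if score > max_score:
--            max_score = score
--            maxcount = rcount
--            time = t[0]
--
--     return maxcount, time,  max_score
-- ===== SOURCE B (Python) =====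
-- def chooseTime(times):
--     # Pass 1: build the table of cumulative (score, count, time) triples.
--     cum = []
--     score = 0
--     count = 0
--     for t in times:
--         if t[1] == 'start':
--             count += 1
--             score += t[2]
--         elif t[1] == 'end':
--             count -= 1
--             score -= t[2]
--         cum.append((score, count, t[0]))
--     # Pass 2: the best cumulative score; pass 3: its first occurrence.
--     best = max((s for s, _, _ in cum), default=0)
--     if best > 0:
--         for s, c, tm in cum:
--             if s == best:
--                 return c, tm, s
--     return 0, 0, 0
-- ===== Notes on version B (the rewrite author's own statement) =====
-- stated objective: alternative
-- what changed: Replaces A's single sweep with an in-loop running maximum by three distinct passes: build a table of cumulative (score,count,time) triples, take the maximum cumulative score with max(), then scan for its first occurrence.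
import Mathlib
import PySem

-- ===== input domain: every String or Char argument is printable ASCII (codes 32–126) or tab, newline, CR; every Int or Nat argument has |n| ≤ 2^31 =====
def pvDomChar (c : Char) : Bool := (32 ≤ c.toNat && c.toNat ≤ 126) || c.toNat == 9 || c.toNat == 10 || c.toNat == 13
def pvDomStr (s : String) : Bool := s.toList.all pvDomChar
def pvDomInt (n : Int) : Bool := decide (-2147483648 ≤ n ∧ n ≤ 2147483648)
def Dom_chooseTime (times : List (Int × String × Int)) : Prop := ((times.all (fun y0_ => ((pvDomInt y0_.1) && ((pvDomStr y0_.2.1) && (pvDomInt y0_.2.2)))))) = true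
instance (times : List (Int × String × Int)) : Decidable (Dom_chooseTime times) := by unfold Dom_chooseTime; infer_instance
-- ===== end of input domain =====

-- B replaces A's single sweep with an in-loop running maximum by three distinct passes
-- (build the cumulative table, max(), first occurrence); objective: alternative decomposition.

-- ===== PORT A =====
-- loop state = (rcount, maxcount, time, score, max_score)
def chooseTimeStep (st : Int × Int × Int × Int × Int) (t : Int × String × Int) :
    Int × Int × Int × Int × Int :=
  let rs := if t.2.1 = "start" then (st.1 + 1, st.2.2.2.1 + t.2.2)
            else if t.2.1 = "end" then (st.1 - 1, st.2.2.2.1 - t.2.2)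
            else (st.1, st.2.2.2.1)
  if rs.2 > st.2.2.2.2 then (rs.1, rs.1, t.1, rs.2, rs.2)
  else (rs.1, st.2.1, st.2.2.1, rs.2, st.2.2.2.2)

def chooseTime (times : List (Int × String × Int)) : Int × Int × Int :=
  let st := times.foldl chooseTimeStep (0, 0, 0, 0, 0)
  (st.2.1, st.2.2.1, st.2.2.2.2)

-- ===== PORT B =====
-- Pass 1: the table of cumulative (score, count, time) triples.
def buildCum : List (Int × String × Int) → Int → Int → List (Int × Int × Int)
  | [], _, _ => []
  | t :: rest, score, count =>
    let sc := if t.2.1 = "start" then (score + t.2.2, count + 1)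
              else if t.2.1 = "end" then (score - t.2.2, count - 1)
              else (score, count)
    (sc.1, sc.2, t.1) :: buildCum rest sc.1 sc.2

-- max(..., default=0)
def maxD (l : List Int) : Int :=
  match PySem.List.max? l (fun x => x) with
  | some m => m
  | none => 0

def chooseTime_alt (times : List (Int × String × Int)) : Int × Int × Int :=
  let cum := buildCum times 0 0
  -- Pass 2
  let best : Int := maxD (cum.map (·.1))
  if best > 0 then
    -- Pass 3: first occurrence of the best score
    match cum.find? (fun x => x.1 == best) with
    | some x => (x.2.1, x.2.2, x.1)
    | none => (0, 0, 0)
  else (0, 0, 0)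

-- ===== PRECONDITION & SPEC =====
def Spec_chooseTime (times : List (Int × String × Int)) (out : Int × Int × Int) : Prop := out = chooseTime_alt times
instance (times : List (Int × String × Int)) (out : Int × Int × Int) : Decidable (Spec_chooseTime times out) := by unfold Spec_chooseTime; infer_instance

-- ===== CLAIM (what is proved, stated in full; the proofs are below) =====
def Claim_equal_chooseTime : Prop := ∀ (times : List (Int × String × Int)), Dom_chooseTime times → Spec_chooseTime times (chooseTime times)

-- ===== LEMMAS AND PROOFS =====

-- selection step over the cumulative table: acc = (maxcount, time, max_score), x = (score, count, time)
def selStep (acc : Int × Int × Int) (x : Int × Int × Int) : Int × Int × Int :=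
  if x.1 > acc.2.2 then (x.2.1, x.2.2, x.1) else acc

theorem find?_congr' {α : Type} (p q : α → Bool) (l : List α)
    (h : ∀ x ∈ l, p x = q x) : l.find? p = l.find? q := by
  induction l with
  | nil => rfl
  | cons a t ih =>
    simp only [List.find?]
    rw [h a (by simp)]
    cases q a with
    | true => rfl
    | false => exact ih (fun x hx => h x (by simp [hx]))

-- A's fold fuses into (table build) + (selection fold).
theorem fuseA (times : List (Int × String × Int)) :
    ∀ (rc mc tm sc ms : Int), ∃ rc' sc',
      times.foldl chooseTimeStep (rc, mc, tm, sc, ms) =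
        (rc', ((buildCum times sc rc).foldl selStep (mc, tm, ms)).1,
          ((buildCum times sc rc).foldl selStep (mc, tm, ms)).2.1, sc',
          ((buildCum times sc rc).foldl selStep (mc, tm, ms)).2.2) := by
  induction times with
  | nil => intro rc mc tm sc ms; exact ⟨rc, sc, rfl⟩
  | cons t rest ih =>
    intro rc mc tm sc ms
    by_cases h1 : t.2.1 = "start"
    · by_cases h3 : sc + t.2.2 > ms
      · simpa [List.foldl, buildCum, chooseTimeStep, selStep, h1, h3] using
          ih (rc + 1) (rc + 1) t.1 (sc + t.2.2) (sc + t.2.2)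
      · simpa [List.foldl, buildCum, chooseTimeStep, selStep, h1, h3] using
          ih (rc + 1) mc tm (sc + t.2.2) ms
    · by_cases h2 : t.2.1 = "end"
      · by_cases h3 : sc - t.2.2 > ms
        · simpa [List.foldl, buildCum, chooseTimeStep, selStep, h1, h2, h3] using
            ih (rc - 1) (rc - 1) t.1 (sc - t.2.2) (sc - t.2.2)
        · simpa [List.foldl, buildCum, chooseTimeStep, selStep, h1, h2, h3] using
            ih (rc - 1) mc tm (sc - t.2.2) ms
      · by_cases h3 : sc > ms
        · simpa [List.foldl, buildCum, chooseTimeStep, selStep, h1, h2, h3] using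
            ih rc rc t.1 sc sc
        · simpa [List.foldl, buildCum, chooseTimeStep, selStep, h1, h2, h3] using
            ih rc mc tm sc ms

theorem foldl_max_shift (l : List (Int × Int × Int)) :
    ∀ a b : Int, l.foldl (fun x y => max x y.1) (max a b) = max a (l.foldl (fun x y => max x y.1) b) := by
  induction l with
  | nil => intro a b; rfl
  | cons c t ih =>
    intro a b
    simp only [List.foldl]
    rw [max_assoc]
    exact ih a (max b c.1)

-- characterisation of the selection fold: the final record is the first element whose score
-- strictly exceeds the initial max and reaches the running maximum
theorem selChar (cum : List (Int × Int × Int)) :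
    ∀ (mc tm ms : Int),
      cum.foldl selStep (mc, tm, ms) =
        (match cum.find? (fun x =>
            decide (ms < x.1) && decide (cum.foldl (fun a y => max a y.1) ms ≤ x.1)) with
         | some x => (x.2.1, x.2.2, x.1)
         | none => (mc, tm, ms)) := by
  induction cum with
  | nil => intro mc tm ms; rfl
  | cons x rest ih =>
    intro mc tm ms
    have hfold : (x :: rest).foldl (fun a y => max a y.1) ms
        = rest.foldl (fun a y => max a y.1) (max ms x.1) := rfl
    by_cases hx : ms < x.1
    · have hmax : max ms x.1 = x.1 := max_eq_right hx.le
      have hL : (x :: rest).foldl selStep (mc, tm, ms) = rest.foldl selStep (x.2.1, x.2.2, x.1) := by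
        simp [List.foldl, selStep, hx]
      by_cases hM : rest.foldl (fun a y => max a y.1) x.1 ≤ x.1
      · have hnone : rest.find? (fun y => decide (x.1 < y.1) &&
            decide (rest.foldl (fun a y => max a y.1) x.1 ≤ y.1)) = none := by
          apply List.find?_eq_none.mpr
          intro y hy
          have hle := (PySem.List.le_foldl_max_int rest (fun z => z.1) x.1).2 y hy
          simp only [Bool.and_eq_true, decide_eq_true_eq, not_and]
          intro h; omega
        rw [hL, ih, hnone]
        have hp : (fun (y : Int × Int × Int) => decide (ms < y.1) &&
            decide ((x :: rest).foldl (fun a y => max a y.1) ms ≤ y.1)) x = true := by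
          simp only [hfold, hmax, Bool.and_eq_true, decide_eq_true_eq]
          exact ⟨hx, hM⟩
        have hfx : List.find? (fun (y : Int × Int × Int) => decide (ms < y.1) &&
            decide ((x :: rest).foldl (fun a y => max a y.1) ms ≤ y.1)) (x :: rest) = some x :=
          List.find?_cons_of_pos hp
        rw [hfx]
      · rw [hL, ih]
        have hp : ¬ ((fun (y : Int × Int × Int) => decide (ms < y.1) &&
            decide ((x :: rest).foldl (fun a y => max a y.1) ms ≤ y.1)) x = true) := by
          simp only [hfold, hmax, Bool.and_eq_true, decide_eq_true_eq, not_and]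
          intro _; exact hM
        have hfx : List.find? (fun (y : Int × Int × Int) => decide (ms < y.1) &&
            decide ((x :: rest).foldl (fun a y => max a y.1) ms ≤ y.1)) (x :: rest)
            = List.find? (fun (y : Int × Int × Int) => decide (ms < y.1) &&
            decide ((x :: rest).foldl (fun a y => max a y.1) ms ≤ y.1)) rest :=
          List.find?_cons_of_neg hp
        rw [hfx]
        have hcongr : rest.find? (fun y => decide (x.1 < y.1) &&
              decide (rest.foldl (fun a y => max a y.1) x.1 ≤ y.1))
            = rest.find? (fun y => decide (ms < y.1) &&
              decide ((x :: rest).foldl (fun a y => max a y.1) ms ≤ y.1)) := by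
          apply find?_congr'
          intro y hy
          simp only [hfold, hmax]
          by_cases hq : rest.foldl (fun a y => max a y.1) x.1 ≤ y.1
          · have h1 : x.1 < y.1 := by omega
            have h2 : ms < y.1 := by omega
            simp [h1, h2, hq]
          · simp [hq]
        rw [hcongr]
        -- the find? succeeds: the running max itself occurs in rest
        have hmem : ∃ y ∈ rest, y.1 = rest.foldl (fun a y => max a y.1) x.1 := by
          have hfm := PySem.List.foldl_max_mem (rest.map (fun z => z.1)) x.1
          rw [List.foldl_map] at hfm
          rcases hfm with hcase | hcase
          · omega
          · rcases List.mem_map.mp hcase with ⟨y, hy, hyy⟩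
            exact ⟨y, hy, hyy⟩
        rcases hmem with ⟨y, hy, hyy⟩
        cases hfind : rest.find? (fun y => decide (ms < y.1) &&
            decide ((x :: rest).foldl (fun a y => max a y.1) ms ≤ y.1)) with
        | some z => rfl
        | none =>
          exfalso
          have hny := List.find?_eq_none.mp hfind y hy
          apply hny
          show (decide (ms < y.1) && decide ((x :: rest).foldl (fun a y => max a y.1) ms ≤ y.1)) = true
          rw [hfold, hmax]
          simp only [Bool.and_eq_true, decide_eq_true_eq]
          constructor <;> omega
    · have hmaxl : max ms x.1 = ms := max_eq_left (by omega)
      have hL : (x :: rest).foldl selStep (mc, tm, ms) = rest.foldl selStep (mc, tm, ms) := by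
        simp [List.foldl, selStep, hx]
      rw [hL, ih]
      have hp : ¬ ((fun (y : Int × Int × Int) => decide (ms < y.1) &&
          decide ((x :: rest).foldl (fun a y => max a y.1) ms ≤ y.1)) x = true) := by
        simp only [Bool.and_eq_true, decide_eq_true_eq, not_and]
        intro h; exact absurd h hx
      have hfx : List.find? (fun (y : Int × Int × Int) => decide (ms < y.1) &&
          decide ((x :: rest).foldl (fun a y => max a y.1) ms ≤ y.1)) (x :: rest)
          = List.find? (fun (y : Int × Int × Int) => decide (ms < y.1) &&
          decide ((x :: rest).foldl (fun a y => max a y.1) ms ≤ y.1)) rest :=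
        List.find?_cons_of_neg hp
      rw [hfx, hfold, hmaxl]

-- ===== VERDICT (by name: the statement is the Claim_ definition above) =====
theorem chooseTime_spec : Claim_equal_chooseTime := by
  intro times _
  unfold Spec_chooseTime
  obtain ⟨rc', sc', h⟩ := fuseA times 0 0 0 0 0
  have hA : chooseTime times = (buildCum times 0 0).foldl selStep (0, 0, 0) := by
    unfold chooseTime
    rw [h]
  rw [hA, selChar]
  unfold chooseTime_alt maxD
  cases hc : buildCum times 0 0 with
  | nil => rfl
  | cons c cr =>
    have hMraw := PySem.List.le_foldl_max_int cr (fun z => z.1) c.1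
    have hMax : PySem.List.max? ((c :: cr).map (fun z => z.1)) (fun x => x)
        = some (cr.foldl (fun a y => max a y.1) c.1) := by
      rw [List.map_cons, PySem.List.max?_id_cons, List.foldl_map]
    have hshift : (c :: cr).foldl (fun a y => max a y.1) 0
        = max 0 (cr.foldl (fun a y => max a y.1) c.1) := by
      show cr.foldl (fun a y => max a y.1) (max 0 c.1)
          = max 0 (cr.foldl (fun a y => max a y.1) c.1)
      exact foldl_max_shift cr 0 c.1
    set Mraw := cr.foldl (fun a y => max a y.1) c.1 with hMdef
    by_cases hb : Mraw > 0
    · have hM0 : (c :: cr).foldl (fun a y => max a y.1) 0 = Mraw := by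
        rw [hshift]; omega
      rw [hM0]
      have hcongr : (c :: cr).find? (fun x => decide ((0:Int) < x.1) && decide (Mraw ≤ x.1))
          = (c :: cr).find? (fun x => x.1 == Mraw) := by
        apply find?_congr'
        intro y hy
        have hle : y.1 ≤ Mraw := by
          rcases hy with _ | hy
          · exact hMraw.1
          · exact hMraw.2 y (by assumption)
        by_cases hEq : y.1 = Mraw
        · have h1 : (y.1 == Mraw) = true := beq_iff_eq.mpr hEq
          rw [h1]
          simp only [Bool.and_eq_true, decide_eq_true_eq]
          constructor <;> omega
        · have h1 : (y.1 == Mraw) = false := by simp [hEq]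
          rw [h1]
          simp only [Bool.and_eq_false_iff, decide_eq_false_iff_not, not_lt, not_le]
          right; omega
      rw [hcongr]
      simp only [hMax, hb, if_pos]
    · have hM0 : (c :: cr).foldl (fun a y => max a y.1) 0 = 0 := by
        rw [hshift]; omega
      rw [hM0]
      have hnone : (c :: cr).find? (fun x => decide ((0:Int) < x.1) && decide ((0:Int) ≤ x.1)) = none := by
        apply List.find?_eq_none.mpr
        intro y hy
        have hle : y.1 ≤ Mraw := by
          rcases hy with _ | hy
          · exact hMraw.1
          · exact hMraw.2 y (by assumption)
        simp only [Bool.and_eq_true, decide_eq_true_eq, not_and]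
        intro hpos _; omega
      rw [hnone]
      simp only [hMax, hb]
      rfl
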